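-- pv_equiv track=rewrite | github.com/tompudding/advent_of_code | 2024/day_9.py | compute_free_space
-- ===== SOURCE A (Python) =====
-- def compute_free_space(disk):
--     in_free = False
--     in_pos = 0
--     out = []
--     for pos, val in enumerate(disk):
--         if in_free:
--             if val is None:
--                 free_len += 1
--             else:
--                 out.append((in_pos, free_len))
--                 in_free = False
--         else:
--             if val is None:
--                 in_free = True
--                 in_pos = pos
--                 free_len = 1
--
--     if in_free:
--         out.append((in_pos, free_len))
--     return out
-- ===== SOURCE B (Python) =====
-- def compute_free_space(disk):
--     out = []
--     i = 0
--     n = len(disk)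
--     while i < n:
--         if disk[i] is None:
--             j = i
--             while j < n and disk[j] is None:
--                 j += 1
--             out.append((i, j - i))
--             i = j
--         else:
--             i += 1
--     return out
-- ===== Notes on version B (the rewrite author's own statement) =====
-- stated objective: idiomatic
-- what changed: Replaced A's flag/accumulator state machine with an index-jumping two-pointer scan that measures each maximal None-run directly and appends (start, length) immediately, eliminating the in_free flag, the carried free_len, and the post-loop flush.
import Mathlib
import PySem

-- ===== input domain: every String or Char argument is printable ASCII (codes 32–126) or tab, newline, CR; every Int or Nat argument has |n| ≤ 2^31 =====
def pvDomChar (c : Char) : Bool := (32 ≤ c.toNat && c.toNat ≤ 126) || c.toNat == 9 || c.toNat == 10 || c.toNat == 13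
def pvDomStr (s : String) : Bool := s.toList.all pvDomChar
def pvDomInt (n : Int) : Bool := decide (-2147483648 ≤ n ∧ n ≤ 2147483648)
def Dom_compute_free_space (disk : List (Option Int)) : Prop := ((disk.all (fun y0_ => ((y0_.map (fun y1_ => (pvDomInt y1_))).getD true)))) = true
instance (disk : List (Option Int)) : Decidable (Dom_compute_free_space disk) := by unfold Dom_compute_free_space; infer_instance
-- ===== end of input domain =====

-- B replaces A's in_free/free_len state machine by an index-jumping scan over maximal
-- None-runs (idiomatic two-pointer decomposition); return values are proved equal.

-- ===== PORT A =====
-- the for-loop over enumerate(disk), state (in_free, in_pos, free_len, out);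
-- free_len is only read when in_free, carried here as a plain Int
def computeFreeLoopA (disk : List (Option Int)) (pos : Int) (in_free : Bool)
    (in_pos free_len : Int) (out : List (Int × Int)) : List (Int × Int) :=
  match disk with
  | [] => if in_free then out ++ [(in_pos, free_len)] else out
  | v :: rest =>
    if in_free then
      match v with
      | none => computeFreeLoopA rest (pos + 1) true in_pos (free_len + 1) out
      | some _ => computeFreeLoopA rest (pos + 1) false in_pos free_len (out ++ [(in_pos, free_len)])
    else
      match v with
      | none => computeFreeLoopA rest (pos + 1) true pos 1 out
      | some _ => computeFreeLoopA rest (pos + 1) false in_pos free_len out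

def compute_free_space (disk : List (Option Int)) : List (Int × Int) :=
  computeFreeLoopA disk 0 false 0 0 []

-- ===== PORT B =====
-- B's outer while: if disk[i] is None, the inner while advances j over the None-run
-- (its length is the takeWhile length), append (i, j - i) and jump i to j; else i += 1.
def computeFreeRunsB (disk : List (Option Int)) (pos : Int) : List (Int × Int) :=
  match disk with
  | [] => []
  | none :: rest =>
      let k := (rest.takeWhile Option.isNone).length
      (pos, (k : Int) + 1) :: computeFreeRunsB (rest.dropWhile Option.isNone) (pos + 1 + k)
  | some _ :: rest => computeFreeRunsB rest (pos + 1)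
  termination_by disk.length
  decreasing_by
  · simpa using Nat.lt_succ_of_le (List.length_dropWhile_le _ _)
  · simp

def compute_free_space_alt (disk : List (Option Int)) : List (Int × Int) :=
  computeFreeRunsB disk 0

-- ===== PRECONDITION & SPEC =====
def Spec_compute_free_space (disk : List (Option Int)) (out : List (Int × Int)) : Prop := out = compute_free_space_alt disk
instance (disk : List (Option Int)) (out : List (Int × Int)) : Decidable (Spec_compute_free_space disk out) := by unfold Spec_compute_free_space; infer_instance

-- ===== CLAIM (what is proved, stated in full; the proofs are below) =====
def Claim_equal_compute_free_space : Prop := ∀ (disk : List (Option Int)), Dom_compute_free_space disk → Spec_compute_free_space disk (compute_free_space disk)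

-- ===== LEMMAS AND PROOFS =====

-- Combined invariant for both loop states, by strong induction on the list length.
theorem computeFree_inv (n : Nat) : ∀ (disk : List (Option Int)), disk.length ≤ n →
    ∀ (pos in_pos free_len : Int) (out : List (Int × Int)),
    (computeFreeLoopA disk pos false in_pos free_len out = out ++ computeFreeRunsB disk pos) ∧
    (computeFreeLoopA disk pos true in_pos free_len out =
      out ++ (in_pos, free_len + (disk.takeWhile Option.isNone).length) ::
        computeFreeRunsB (disk.dropWhile Option.isNone) (pos + (disk.takeWhile Option.isNone).length)) := by
  induction n with
  | zero =>
    intro disk hlen pos in_pos free_len out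
    have : disk = [] := List.eq_nil_of_length_eq_zero (Nat.le_zero.mp hlen)
    subst this
    simp [computeFreeLoopA, computeFreeRunsB]
  | succ n ih =>
    intro disk hlen pos in_pos free_len out
    match disk with
    | [] => simp [computeFreeLoopA, computeFreeRunsB]
    | v :: rest =>
      have hr : rest.length ≤ n := by simpa using Nat.lt_succ_iff.mp (Nat.lt_of_lt_of_le (by simp) hlen)
      constructor
      · match v with
        | none =>
          have h2 := (ih rest hr (pos + 1) pos 1 out).2
          rw [computeFreeLoopA, computeFreeRunsB]
          simp only [h2]
          push_cast
          ring_nf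
        | some w =>
          have h1 := (ih rest hr (pos + 1) in_pos free_len out).1
          rw [computeFreeLoopA, computeFreeRunsB]
          simpa using h1
      · match v with
        | none =>
          have h2 := (ih rest hr (pos + 1) in_pos (free_len + 1) out).2
          rw [computeFreeLoopA]
          simp only [h2, List.takeWhile, List.dropWhile, Option.isNone, List.length_cons]
          push_cast
          ring_nf
        | some w =>
          have h1 := (ih rest hr (pos + 1) in_pos free_len (out ++ [(in_pos, free_len)])).1
          rw [computeFreeLoopA]
          simp only [h1, List.takeWhile, List.dropWhile, Option.isNone]
          rw [computeFreeRunsB]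
          simp

-- ===== VERDICT (by name: the statement is the Claim_ definition above) =====
theorem compute_free_space_spec : Claim_equal_compute_free_space := by
  intro disk _
  unfold Spec_compute_free_space compute_free_space compute_free_space_alt
  simpa using (computeFree_inv disk.length disk (le_refl _) 0 0 0 []).1
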